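-- pv_equiv track=rewrite | github.com/sisterdy/CodingTest | solutions/msms804/2026-02-25/programmers_전력망을 둘로 나누기.py | solution
-- ===== SOURCE A (Python) =====
-- from collections import deque
--
-- def bfs(start, visited, tree):
--     # 송전탑 개수
--     cnt = 1
--     q = deque([start])
--     visited[start] = True
--
--     while q:
--         v = q.popleft()
--         for i in tree[v]:
--             if visited[i]:
--                 continue
--             q.append(i)
--             cnt += 1
--             visited[i] = True
--     return cnt
--
-- def solution(n, wires):
--     answer = n
--     tree = [[] for _ in range(n + 1)]
--
--     # 트리 만들기
--     for a, b in wires: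
--         tree[a].append(b)
--         tree[b].append(a)
--
--     # 간선 끊기
--     for start, split in wires:
--         visited = [False] * (n + 1)
--         visited[split] = True
--         cnt = bfs(start, visited, tree)
--
--         # 더 차이가 적은것으로 갱신
--         if abs(cnt - (n - cnt)) < answer:
--             answer = abs(cnt - (n - cnt))
--
--     return answer
-- ===== SOURCE B (Python) =====
-- def solution(n, wires):
--     # Queue-free re-implementation: for each removed wire, grow the component
--     # of one endpoint by repeated fixed-point sweeps over all nodes instead of
--     # an explicit BFS queue, and read its size off with sum().
--     adj = [[] for _ in range(n + 1)]
--     for a, b in wires: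
--         adj[a].append(b)
--         adj[b].append(a)
--     best = n
--     for a, b in wires:
--         seen = [False] * (n + 1)
--         seen[b] = True
--         seen[a] = True
--         comp = [False] * (n + 1)
--         comp[a] = True
--         changed = True
--         while changed:
--             changed = False
--             for v in range(n + 1):
--                 if comp[v]:
--                     for w in adj[v]:
--                         if not seen[w]:
--                             seen[w] = True
--                             comp[w] = True
--                             changed = True
--         cnt = sum(comp)
--         d = abs(2 * cnt - n)
--         if d < best:
--             best = d
--     return best
-- ===== Notes on version B (the rewrite author's own statement) =====
-- stated objective: alternative
-- what changed: Replaces the per-edge BFS with an explicit deque by a queue-free fixed-point label propagation: the cut component is grown by repeated sweeps over all nodes until no cell changes, and its size is read off with sum(comp) instead of an incremented counter; Pre_ excludes wire endpoints outside Python's index range [-(n+1), n], where both programs raise IndexError.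
import Mathlib
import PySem

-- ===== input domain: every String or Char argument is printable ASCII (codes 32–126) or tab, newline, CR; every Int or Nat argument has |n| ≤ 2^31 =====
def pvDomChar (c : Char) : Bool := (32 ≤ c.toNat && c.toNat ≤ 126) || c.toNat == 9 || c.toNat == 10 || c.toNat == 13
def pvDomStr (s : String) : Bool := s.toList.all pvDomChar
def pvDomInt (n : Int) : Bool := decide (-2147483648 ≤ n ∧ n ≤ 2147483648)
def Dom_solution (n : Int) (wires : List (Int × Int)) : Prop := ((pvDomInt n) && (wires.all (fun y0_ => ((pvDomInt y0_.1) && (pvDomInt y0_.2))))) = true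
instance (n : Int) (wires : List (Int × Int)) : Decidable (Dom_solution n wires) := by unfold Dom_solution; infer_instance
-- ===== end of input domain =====

-- B replaces the per-edge BFS queue by a queue-free fixed-point label propagation
-- (sweep all nodes until nothing changes); same return value on all inputs Pre_ admits.
-- (A mutates no caller-visible argument; `visited` is allocated per call.)

-- ===== PORT A =====
-- Python list indexing l[i] for -len(l) ≤ i < len(l) is exactly element (i mod len(l));
-- Pre_solution restricts every index to that range, so these emod-total helpers are exact there.
def pvIdx (len : Nat) (i : Int) : Nat := (i.emod (len : Int)).toNat

def pvBget (l : List Bool) (i : Int) : Bool := l.getD (pvIdx l.length i) true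

def pvBset (l : List Bool) (i : Int) : List Bool := l.set (pvIdx l.length i) true

def pvLget (l : List (List Int)) (i : Int) : List Int := l.getD (pvIdx l.length i) []

def pvLapp (l : List (List Int)) (i : Int) (x : Int) : List (List Int) :=
  l.modify (pvIdx l.length i) (fun xs => xs ++ [x])


theorem pvBget_false_lt (l : List Bool) (i : Int) (h : pvBget l i = false) :
    pvIdx l.length i < l.length := by
  by_contra hge
  have hnone : l.getD (pvIdx l.length i) true = true := by
    rw [List.getD_eq_getElem?_getD, List.getElem?_eq_none (by omega)]; rfl
  unfold pvBget at h; rw [hnone] at h; simp at h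

theorem pvBget_false_elem (l : List Bool) (i : Int) (h : pvBget l i = false) :
    l[pvIdx l.length i]'(pvBget_false_lt l i h) = false := by
  have hj := pvBget_false_lt l i h
  unfold pvBget at h
  rwa [List.getD_eq_getElem _ _ hj] at h

theorem pvBset_count_false (l : List Bool) (i : Int) (h : pvBget l i = false) :
    (pvBset l i).count false + 1 = l.count false := by
  have hj := pvBget_false_lt l i h
  have hv := pvBget_false_elem l i h
  have hpos : 0 < l.count false := List.count_pos_iff.mpr (hv ▸ List.getElem_mem hj)
  unfold pvBset
  rw [List.count_set hj]
  simp [hv]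
  omega

-- `for i in tree[v]: if visited[i]: continue; q.append(i); cnt += 1; visited[i] = True`
def stepA (vis : List Bool) (q : List Int) (cnt : Int) : List Int → List Bool × List Int × Int
  | [] => (vis, q, cnt)
  | i :: rest =>
    if pvBget vis i then stepA vis q cnt rest
    else stepA (pvBset vis i) (q ++ [i]) (cnt + 1) rest

theorem stepA_count_le (ns : List Int) (vis : List Bool) (q : List Int) (cnt : Int) :
    (stepA vis q cnt ns).1.count false ≤ vis.count false := by
  induction ns generalizing vis q cnt with
  | nil => simp [stepA]
  | cons i rest ih =>
    by_cases h : pvBget vis i = true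
    · simpa [stepA, h] using ih vis q cnt
    · simp only [stepA, Bool.not_eq_true] at h ⊢
      rw [h]
      refine le_trans (ih _ _ _) ?_
      have : (pvBset vis i).count false + 1 = vis.count false := pvBset_count_false vis i h
      omega

theorem stepA_decr (ns : List Int) (vis : List Bool) (q : List Int) (cnt : Int) :
    (stepA vis q cnt ns).1.count false < vis.count false ∨
      ((stepA vis q cnt ns).1 = vis ∧ (stepA vis q cnt ns).2.1 = q) := by
  induction ns generalizing vis q cnt with
  | nil => right; simp [stepA]
  | cons i rest ih =>
    by_cases h : pvBget vis i = true
    · simpa [stepA, h] using ih vis q cnt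
    · simp only [stepA, Bool.not_eq_true] at h ⊢
      rw [h]
      left
      refine lt_of_le_of_lt (stepA_count_le _ _ _ _) ?_
      have : (pvBset vis i).count false + 1 = vis.count false := pvBset_count_false vis i h
      omega

-- `while q: v = q.popleft(); …`  (returns the final cnt and visited)
def loopA (tree : List (List Int)) (vis : List Bool) (q : List Int) (cnt : Int) : Int × List Bool :=
  match q with
  | [] => (cnt, vis)
  | v :: q' =>
    let r := stepA vis q' cnt (pvLget tree v)
    loopA tree r.1 r.2.1 r.2.2
termination_by (vis.count false, q.length)
decreasing_by
  rcases stepA_decr (pvLget tree v) vis q' cnt with h | ⟨h1, h2⟩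
  · exact Prod.Lex.left _ _ h
  · rw [h1, h2]; exact Prod.Lex.right _ (by simp)

-- Python `bfs(start, visited, tree)` (returns cnt; the visited list is local to each solution-loop turn)
def bfsA (start : Int) (visited : List Bool) (tree : List (List Int)) : Int :=
  (loopA tree (pvBset visited start) [start] 1).1

def solution (n : Int) (wires : List (Int × Int)) : Int :=
  -- `[[] for _ in range(n + 1)]`
  let tree0 : List (List Int) := List.replicate (n + 1).toNat []
  let tree := wires.foldl (fun t p => pvLapp (pvLapp t p.1 p.2) p.2 p.1) tree0
  wires.foldl (fun answer p =>
    let visited := pvBset (List.replicate (n + 1).toNat false) p.2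
    let cnt := bfsA p.1 visited tree
    if |cnt - (n - cnt)| < answer then |cnt - (n - cnt)| else answer) n

-- ===== PORT B =====
-- `for w in adj[v]: if not seen[w]: seen[w] = True; comp[w] = True; changed = True`
def relaxB (seen comp : List Bool) (ch : Bool) : List Int → List Bool × List Bool × Bool
  | [] => (seen, comp, ch)
  | w :: rest =>
    if pvBget seen w then relaxB seen comp ch rest
    else relaxB (pvBset seen w) (pvBset comp w) true rest

-- one sweep `for v in range(n + 1): if comp[v]: …` starting with changed = False
def passB (adj : List (List Int)) (m : Int) (seen comp : List Bool) : List Bool × List Bool × Bool :=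
  (PySem.List.pyRange 0 m 1).foldl
    (fun st v => if pvBget st.2.1 v then relaxB st.1 st.2.1 st.2.2 (pvLget adj v) else st)
    (seen, comp, false)

theorem relaxB_decr (ws : List Int) (seen comp : List Bool) (ch : Bool) :
    (relaxB seen comp ch ws).1.count false < seen.count false ∨
      relaxB seen comp ch ws = (seen, comp, ch) := by
  induction ws generalizing seen comp ch with
  | nil => right; simp [relaxB]
  | cons w rest ih =>
    by_cases h : pvBget seen w = true
    · simpa [relaxB, h] using ih seen comp ch
    · simp only [relaxB, Bool.not_eq_true] at h ⊢
      rw [h]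
      simp only [Bool.false_eq_true, if_false]
      left
      have hlt : (pvBset seen w).count false + 1 = seen.count false := pvBset_count_false seen w h
      rcases ih (pvBset seen w) (pvBset comp w) true with h' | h'
      · omega
      · rw [h']
        show (pvBset seen w).count false < seen.count false
        omega

theorem passB_decr (adj : List (List Int)) (m : Int) (seen comp : List Bool) :
    (passB adj m seen comp).1.count false < seen.count false ∨
      passB adj m seen comp = (seen, comp, false) := by
  unfold passB
  generalize PySem.List.pyRange 0 m 1 = vs
  have key : ∀ (vs : List Int) (st : List Bool × List Bool × Bool),
      (vs.foldl (fun st v => if pvBget st.2.1 v then relaxB st.1 st.2.1 st.2.2 (pvLget adj v) else st) st).1.count false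
        < st.1.count false ∨
      vs.foldl (fun st v => if pvBget st.2.1 v then relaxB st.1 st.2.1 st.2.2 (pvLget adj v) else st) st = st := by
    intro vs
    induction vs with
    | nil => intro st; right; rfl
    | cons v rest ih =>
      rintro ⟨s1, s2, s3⟩
      simp only [List.foldl_cons]
      by_cases h : pvBget s2 v = true
      · simp only [h, if_pos]
        rcases ih (relaxB s1 s2 s3 (pvLget adj v)) with h' | h'
        · rcases relaxB_decr (pvLget adj v) s1 s2 s3 with h2 | h2
          · left; exact lt_trans h' h2
          · rw [h2] at h' ⊢; left; exact h'
        · rw [h']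
          rcases relaxB_decr (pvLget adj v) s1 s2 s3 with h2 | h2
          · left; exact h2
          · right; rw [h2]
      · simp only [h, Bool.false_eq_true, if_false]; exact ih (s1, s2, s3)
  exact key vs (seen, comp, false)

-- `while changed:` — terminates because every productive sweep marks a new cell seen
def loopB (adj : List (List Int)) (m : Int) (seen comp : List Bool) : List Bool × List Bool :=
  let r := passB adj m seen comp
  if r.2.2 then loopB adj m r.1 r.2.1 else (r.1, r.2.1)
termination_by seen.count false
decreasing_by
  rcases passB_decr adj m seen comp with h | h
  · exact h
  · rename_i hch
    have hch2 : (passB adj m seen comp).2.2 = true := hch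
    rw [h] at hch2; simp at hch2

def solution_alt (n : Int) (wires : List (Int × Int)) : Int :=
  let adj0 : List (List Int) := List.replicate (n + 1).toNat []
  let adj := wires.foldl (fun ad p => pvLapp (pvLapp ad p.1 p.2) p.2 p.1) adj0
  wires.foldl (fun best p =>
    let seen := pvBset (pvBset (List.replicate (n + 1).toNat false) p.2) p.1
    let comp := pvBset (List.replicate (n + 1).toNat false) p.1
    let r := loopB adj (n + 1) seen comp
    let cnt : Int := ((r.2.count true : Nat) : Int)
    let d := |2 * cnt - n|
    if d < best then d else best) n

-- ===== PRECONDITION & SPEC =====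
-- Pre_solution: exactly the inputs on which A returns normally — every wire endpoint must be a
-- valid Python index into the (n+1)-element lists, i.e. lie in [-(n+1), n]; otherwise A raises IndexError.
def Pre_solution (n : Int) (wires : List (Int × Int)) : Prop :=
  ∀ p ∈ wires, -(n + 1) ≤ p.1 ∧ p.1 ≤ n ∧ -(n + 1) ≤ p.2 ∧ p.2 ≤ n
instance (n : Int) (wires : List (Int × Int)) : Decidable (Pre_solution n wires) := by
  unfold Pre_solution; infer_instance

def pvWitness_solution : Int × (List (Int × Int)) := (4, [(1, 3), (2, 3), (3, 4)])

def Spec_solution (n : Int) (wires : List (Int × Int)) (out : Int) : Prop := out = solution_alt n wires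
instance (n : Int) (wires : List (Int × Int)) (out : Int) : Decidable (Spec_solution n wires out) := by unfold Spec_solution; infer_instance

-- ===== CLAIM (what is proved, stated in full; the proofs are below) =====
def Claim_equal_solution : Prop := ∀ (n : Int) (wires : List (Int × Int)), Dom_solution n wires → Pre_solution n wires → Spec_solution n wires (solution n wires)

-- ===== LEMMAS AND PROOFS =====

-- Basic facts about the emod index helpers

theorem pvIdx_lt {N : Nat} (hN : 0 < N) (i : Int) : pvIdx N i < N := by
  unfold pvIdx
  have hne : (N : Int) ≠ 0 := by exact_mod_cast hN.ne'
  have h1 : 0 ≤ i.emod N := Int.emod_nonneg i hne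
  have h2 : i.emod N < (N : Int) := Int.emod_lt_of_pos i (by exact_mod_cast hN)
  omega

theorem pvIdx_coe {N : Nat} (x : Nat) (hx : x < N) : pvIdx N (x : Int) = x := by
  unfold pvIdx
  rw [show ((x : Int).emod (N : Int)) = (x : Int) from
    Int.emod_eq_of_lt (Int.natCast_nonneg x) (by exact_mod_cast hx)]
  simp

-- pvMem l j : cell j of a boolean list (false beyond the end)
def pvMem (l : List Bool) (j : Nat) : Bool := l.getD j false

theorem pvBget_eq_pvMem (l : List Bool) (hl : 0 < l.length) (i : Int) :
    pvBget l i = pvMem l (pvIdx l.length i) := by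
  have hj := pvIdx_lt hl i
  unfold pvBget pvMem
  rw [List.getD_eq_getElem _ _ hj, List.getD_eq_getElem _ _ hj]

theorem length_pvBset (l : List Bool) (i : Int) : (pvBset l i).length = l.length := by
  unfold pvBset; simp

theorem pvMem_set_self (l : List Bool) (j : Nat) (hj : j < l.length) :
    pvMem (l.set j true) j = true := by
  unfold pvMem
  rw [List.getD_eq_getElem?_getD, List.getElem?_set]
  simp [hj]

theorem pvMem_set_ne (l : List Bool) (j k : Nat) (hk : k ≠ j) :
    pvMem (l.set j true) k = pvMem l k := by
  unfold pvMem
  rw [List.getD_eq_getElem?_getD, List.getElem?_set, if_neg (fun h => hk h.symm),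
    ← List.getD_eq_getElem?_getD]

theorem pvMem_of_ge (l : List Bool) (k : Nat) (hk : l.length ≤ k) : pvMem l k = false := by
  unfold pvMem
  rw [List.getD_eq_getElem?_getD, List.getElem?_eq_none (by omega)]
  rfl

theorem count_true_set (l : List Bool) (j : Nat) (hj : j < l.length) :
    (l.set j true).count true = l.count true + (if pvMem l j = true then 0 else 1) := by
  have hm : pvMem l j = l[j] := by unfold pvMem; rw [List.getD_eq_getElem _ _ hj]
  rcases hb : l[j] with _ | _
  · rw [List.count_set hj]; simp [hm, hb]
  · have hpos : 0 < l.count true := List.count_pos_iff.mpr (hb ▸ List.getElem_mem hj)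
    rw [List.count_set hj]; simp [hm, hb]; omega

-- Reachability from s in the graph with node t removed (s itself is always allowed)
inductive Reach (f : Nat → List Nat) (s t : Nat) : Nat → Prop
  | base : Reach f s t s
  | step {x y : Nat} : Reach f s t x → (x = s ∨ x ≠ t) → (y = s ∨ y ≠ t) → y ∈ f x →
      Reach f s t y

theorem Reach_perm {f : Nat → List Nat} {s t j : Nat} (h : Reach f s t j) : j = s ∨ j ≠ t := by
  cases h with
  | base => exact Or.inl rfl
  | step _ _ hy _ => exact hy

theorem Reach_t_iff {f : Nat → List Nat} {s t : Nat} : Reach f s t t ↔ t = s := by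
  constructor
  · intro h; rcases Reach_perm h with h | h
    · exact h
    · exact absurd rfl h
  · rintro rfl; exact Reach.base

-- the neighbour function of an adjacency-list graph, with indices normalised
def NbrF (tr : List (List Int)) (x : Nat) : List Nat := (tr.getD x []).map (pvIdx tr.length)

-- ===== invariants carried through A's BFS loop =====

structure StepOut (N : Nat) (f : Nat → List Nat) (s t : Nat)
    (vis : List Bool) (q : List Int) (cnt : Int) (ns : List Int)
    (r : List Bool × List Int × Int) : Prop where
  len : r.1.length = vis.length
  mono : ∀ j, pvMem vis j = true → pvMem r.1 j = true
  sound : ∀ j, pvMem r.1 j = true → pvMem vis j = true ∨ (j ≠ t ∧ Reach f s t j)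
  qold : ∀ v ∈ q, v ∈ r.2.1
  qnew : ∀ v ∈ r.2.1, v ∈ q ∨ (pvIdx N v ≠ t ∧ Reach f s t (pvIdx N v))
  newq : ∀ j, pvMem r.1 j = true → pvMem vis j = true ∨ ∃ w ∈ r.2.1, pvIdx N w = j
  cover : ∀ i ∈ ns, pvMem r.1 (pvIdx N i) = true
  cnt : r.2.2 - cnt = (r.1.count true : Int) - (vis.count true : Int)

theorem stepA_spec {N : Nat} {f : Nat → List Nat} {s t : Nat} (hN : 0 < N) :
    ∀ (ns : List Int) (vis : List Bool) (q : List Int) (cnt : Int),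
      vis.length = N → pvMem vis t = true →
      (∀ i ∈ ns, pvIdx N i ≠ t → Reach f s t (pvIdx N i)) →
      StepOut N f s t vis q cnt ns (stepA vis q cnt ns) := by
  intro ns
  induction ns with
  | nil =>
    intro vis q cnt hlen htm hns
    exact {
      len := rfl
      mono := fun j h => h
      sound := fun j h => Or.inl h
      qold := fun v hv => hv
      qnew := fun v hv => Or.inl hv
      newq := fun j h => Or.inl h
      cover := by intro i hi; cases hi
      cnt := by simp [stepA] }
  | cons i rest ih =>
    intro vis q cnt hlen htm hns
    have hlpos : 0 < vis.length := by omega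
    by_cases h : pvBget vis i = true
    · have hiv : pvMem vis (pvIdx N i) = true := by
        rw [pvBget_eq_pvMem vis hlpos i, hlen] at h; exact h
      have R := ih vis q cnt hlen htm (fun i' hi' => hns i' (List.mem_cons_of_mem _ hi'))
      rw [stepA, if_pos h]
      exact {
        len := R.len
        mono := R.mono
        sound := R.sound
        qold := R.qold
        qnew := R.qnew
        newq := R.newq
        cover := by
          intro i' hi'
          rcases List.mem_cons.mp hi' with rfl | hi'
          · exact R.mono _ hiv
          · exact R.cover i' hi'
        cnt := R.cnt }
    · rw [Bool.not_eq_true] at h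
      have hiv : pvMem vis (pvIdx N i) = false := by
        rw [pvBget_eq_pvMem vis hlpos i, hlen] at h; exact h
      have hjt : pvIdx N i ≠ t := fun he => by rw [he, htm] at hiv; cases hiv
      have hreach : Reach f s t (pvIdx N i) := hns i (List.mem_cons_self) hjt
      have hjlt : pvIdx N i < vis.length := by rw [hlen]; exact pvIdx_lt hN i
      have hset : pvBset vis i = vis.set (pvIdx N i) true := by
        unfold pvBset; rw [hlen]
      have hlen' : (pvBset vis i).length = N := by rw [length_pvBset, hlen]
      have htm' : pvMem (pvBset vis i) t = true := by
        rw [hset, pvMem_set_ne vis _ t (fun he => hjt he.symm)]; exact htm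
      have R := ih (pvBset vis i) (q ++ [i]) (cnt + 1) hlen' htm'
        (fun i' hi' => hns i' (List.mem_cons_of_mem _ hi'))
      rw [stepA, if_neg (by simp [h])]
      refine {
        len := by rw [R.len, length_pvBset]
        mono := ?_
        sound := ?_
        qold := ?_
        qnew := ?_
        newq := ?_
        cover := ?_
        cnt := ?_ }
      · intro j hj
        refine R.mono j ?_
        by_cases hji : j = pvIdx N i
        · rw [hji, hiv] at hj; cases hj
        · rw [hset, pvMem_set_ne vis _ j hji]; exact hj
      · intro j hj
        rcases R.sound j hj with hj' | hj'
        · by_cases hji : j = pvIdx N i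
          · subst hji; exact Or.inr ⟨hjt, hreach⟩
          · rw [hset, pvMem_set_ne vis _ j hji] at hj'; exact Or.inl hj'
        · exact Or.inr hj'
      · intro v hv; exact R.qold v (List.mem_append_left _ hv)
      · intro v hv
        rcases R.qnew v hv with hv' | hv'
        · rcases List.mem_append.mp hv' with hv'' | hv''
          · exact Or.inl hv''
          · rcases List.mem_singleton.mp hv'' with rfl
            exact Or.inr ⟨hjt, hreach⟩
        · exact Or.inr hv'
      · intro j hj
        rcases R.newq j hj with hj' | hj'
        · by_cases hji : j = pvIdx N i
          · subst hji
            refine Or.inr ⟨i, R.qold i (List.mem_append_right _ (List.mem_singleton_self i)), rfl⟩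
          · rw [hset, pvMem_set_ne vis _ j hji] at hj'; exact Or.inl hj'
        · exact Or.inr hj'
      · intro i' hi'
        rcases List.mem_cons.mp hi' with rfl | hi'
        · refine R.mono _ ?_
          rw [hset]; exact pvMem_set_self vis _ hjlt
        · exact R.cover i' hi'
      · have hc := R.cnt
        have hcount : (pvBset vis i).count true = vis.count true + 1 := by
          rw [hset, count_true_set vis _ hjlt, hiv]; simp
        rw [hcount] at hc
        omega

structure LoopOut (N : Nat) (f : Nat → List Nat) (s t : Nat)
    (vis : List Bool) (cnt : Int) (r : Int × List Bool) : Prop where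
  len : r.2.length = vis.length
  mono : ∀ j, pvMem vis j = true → pvMem r.2 j = true
  sound : ∀ j, pvMem r.2 j = true → j = t ∨ Reach f s t j
  closed : ∀ x, pvMem r.2 x = true → (x = s ∨ x ≠ t) → ∀ y ∈ f x, pvMem r.2 y = true
  cnt : r.1 - cnt = (r.2.count true : Int) - (vis.count true : Int)

theorem loopA_spec (tree : List (List Int)) (s t : Nat) (hN : 0 < tree.length) :
    ∀ (vis : List Bool) (q : List Int) (cnt : Int),
      vis.length = tree.length → pvMem vis t = true →
      (∀ v ∈ q, (pvIdx tree.length v = s ∨ pvIdx tree.length v ≠ t) ∧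
        Reach (NbrF tree) s t (pvIdx tree.length v)) →
      (∀ j, pvMem vis j = true → j = t ∨ Reach (NbrF tree) s t j) →
      (∀ x, pvMem vis x = true → (x = s ∨ x ≠ t) →
        (∃ v ∈ q, pvIdx tree.length v = x) ∨ (∀ y ∈ NbrF tree x, pvMem vis y = true)) →
      LoopOut tree.length (NbrF tree) s t vis cnt (loopA tree vis q cnt) := by
  intro vis q cnt
  induction vis, q, cnt using loopA.induct (tree := tree) with
  | case1 vis cnt =>
    intro hlen htm hq hsound hgood
    rw [loopA]
    exact {
      len := rfl
      mono := fun j h => h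
      sound := hsound
      closed := by
        intro x hx hpx y hy
        rcases hgood x hx hpx with ⟨v, hv, _⟩ | hcl
        · cases hv
        · exact hcl y hy
      cnt := by
        show cnt - cnt = ((vis.count true : Nat) : Int) - ((vis.count true : Nat) : Int)
        omega }
  | case2 vis cnt v q' rr ih =>
    intro hlen htm hq hsound hgood
    have hns : ∀ i ∈ pvLget tree v, pvIdx tree.length i ≠ t →
        Reach (NbrF tree) s t (pvIdx tree.length i) := by
      intro i hi hit
      obtain ⟨hperm, hre⟩ := hq v (List.mem_cons_self)
      refine Reach.step hre hperm (Or.inr hit) ?_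
      unfold NbrF
      exact List.mem_map_of_mem hi
    have S := stepA_spec (f := NbrF tree) (s := s) (t := t) hN
      (pvLget tree v) vis q' cnt hlen htm hns
    have hrr : rr = stepA vis q' cnt (pvLget tree v) := rfl
    rw [← hrr] at S
    have hlen' : rr.1.length = tree.length := by rw [S.len, hlen]
    have htm' : pvMem rr.1 t = true := S.mono t htm
    have hq' : ∀ w ∈ rr.2.1, (pvIdx tree.length w = s ∨ pvIdx tree.length w ≠ t) ∧
        Reach (NbrF tree) s t (pvIdx tree.length w) := by
      intro w hw
      rcases S.qnew w hw with hw' | ⟨hnt, hre⟩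
      · exact hq w (List.mem_cons_of_mem _ hw')
      · exact ⟨Or.inr hnt, hre⟩
    have hsound' : ∀ j, pvMem rr.1 j = true → j = t ∨ Reach (NbrF tree) s t j := by
      intro j hj
      rcases S.sound j hj with hj' | ⟨_, hre⟩
      · exact hsound j hj'
      · exact Or.inr hre
    have hgood' : ∀ x, pvMem rr.1 x = true → (x = s ∨ x ≠ t) →
        (∃ w ∈ rr.2.1, pvIdx tree.length w = x) ∨ (∀ y ∈ NbrF tree x, pvMem rr.1 y = true) := by
      intro x hx hpx
      rcases S.newq x hx with hxv | hw
      · rcases hgood x hxv hpx with ⟨v', hv', hvx⟩ | hcl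
        · rcases List.mem_cons.mp hv' with he | hv''
          · right
            intro y hy
            unfold NbrF at hy
            rcases List.mem_map.mp hy with ⟨i, hi, rfl⟩
            rw [← hvx, he] at hi
            exact S.cover i hi
          · exact Or.inl ⟨v', S.qold v' hv'', hvx⟩
        · right; intro y hy; exact S.mono y (hcl y hy)
      · exact Or.inl hw
    have L := ih hlen' htm' hq' hsound' hgood'
    rw [loopA, ← hrr]
    exact {
      len := by rw [L.len, S.len]
      mono := fun j h => L.mono j (S.mono j h)
      sound := L.sound
      closed := L.closed
      cnt := by
        have h1 := L.cnt
        have h2 := S.cnt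
        omega }

-- if the final visited set is closed and contains s, it contains everything reachable
theorem Reach_mem_of_closed {f : Nat → List Nat} {s t : Nat} (vf : List Bool)
    (hs : pvMem vf s = true)
    (hcl : ∀ x, pvMem vf x = true → (x = s ∨ x ≠ t) → ∀ y ∈ f x, pvMem vf y = true) :
    ∀ j, Reach f s t j → pvMem vf j = true := by
  intro j h
  induction h with
  | base => exact hs
  | step hx hpx _ hyf ih => exact hcl _ ih hpx _ hyf

-- ===== invariants carried through B's propagation =====

structure InvB (N : Nat) (f : Nat → List Nat) (s t : Nat) (seen comp : List Bool) : Prop where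
  lenS : seen.length = N
  lenC : comp.length = N
  rel : ∀ j, pvMem seen j = true ↔ (j = t ∨ pvMem comp j = true)
  sound : ∀ j, pvMem comp j = true → Reach f s t j

structure RelaxOut (N : Nat) (f : Nat → List Nat) (s t : Nat)
    (seen comp : List Bool) (ws : List Int) (r : List Bool × List Bool × Bool) : Prop where
  inv : InvB N f s t r.1 r.2.1
  monoC : ∀ j, pvMem comp j = true → pvMem r.2.1 j = true
  cover : ∀ w ∈ ws, pvMem r.1 (pvIdx N w) = true

theorem relaxB_spec {N : Nat} {f : Nat → List Nat} {s t : Nat} (hN : 0 < N) :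
    ∀ (ws : List Int) (seen comp : List Bool) (ch : Bool),
      InvB N f s t seen comp →
      (∀ w ∈ ws, pvIdx N w ≠ t → Reach f s t (pvIdx N w)) →
      RelaxOut N f s t seen comp ws (relaxB seen comp ch ws) := by
  intro ws
  induction ws with
  | nil =>
    intro seen comp ch hinv hws
    exact {
      inv := hinv
      monoC := fun j h => h
      cover := by intro w hw; cases hw }
  | cons w rest ih =>
    intro seen comp ch hinv hws
    have hspos : 0 < seen.length := by rw [hinv.lenS]; exact hN
    have htm : pvMem seen t = true := (hinv.rel t).mpr (Or.inl rfl)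
    by_cases h : pvBget seen w = true
    · have hwv : pvMem seen (pvIdx N w) = true := by
        rw [pvBget_eq_pvMem seen hspos w, hinv.lenS] at h; exact h
      have R := ih seen comp ch hinv (fun w' hw' => hws w' (List.mem_cons_of_mem _ hw'))
      rw [relaxB, if_pos h]
      exact {
        inv := R.inv
        monoC := R.monoC
        cover := by
          intro w' hw'
          rcases List.mem_cons.mp hw' with he | hw'
          · rw [he]
            rcases (hinv.rel (pvIdx N w)).mp hwv with he | hc
            · exact (R.inv.rel _).mpr (Or.inl he)
            · exact (R.inv.rel _).mpr (Or.inr (R.monoC _ hc))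
          · exact R.cover w' hw' }
    · rw [Bool.not_eq_true] at h
      have hwv : pvMem seen (pvIdx N w) = false := by
        rw [pvBget_eq_pvMem seen hspos w, hinv.lenS] at h; exact h
      have hjt : pvIdx N w ≠ t := fun he => by rw [he, htm] at hwv; cases hwv
      have hreach : Reach f s t (pvIdx N w) := hws w (List.mem_cons_self) hjt
      have hjs : pvIdx N w < seen.length := by rw [hinv.lenS]; exact pvIdx_lt hN w
      have hjc : pvIdx N w < comp.length := by rw [hinv.lenC]; exact pvIdx_lt hN w
      have hsetS : pvBset seen w = seen.set (pvIdx N w) true := by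
        unfold pvBset; rw [hinv.lenS]
      have hsetC : pvBset comp w = comp.set (pvIdx N w) true := by
        unfold pvBset; rw [hinv.lenC]
      have hinv' : InvB N f s t (pvBset seen w) (pvBset comp w) := {
        lenS := by rw [length_pvBset, hinv.lenS]
        lenC := by rw [length_pvBset, hinv.lenC]
        rel := by
          intro j
          by_cases hji : j = pvIdx N w
          · subst hji
            rw [hsetS, hsetC, pvMem_set_self _ _ hjs, pvMem_set_self _ _ hjc]
            simp
          · rw [hsetS, hsetC, pvMem_set_ne _ _ _ hji, pvMem_set_ne _ _ _ hji]
            exact hinv.rel j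
        sound := by
          intro j hj
          by_cases hji : j = pvIdx N w
          · subst hji; exact hreach
          · rw [hsetC, pvMem_set_ne _ _ _ hji] at hj; exact hinv.sound j hj }
      have R := ih (pvBset seen w) (pvBset comp w) true hinv'
        (fun w' hw' => hws w' (List.mem_cons_of_mem _ hw'))
      rw [relaxB, if_neg (by simp [h])]
      exact {
        inv := R.inv
        monoC := by
          intro j hj
          refine R.monoC j ?_
          by_cases hji : j = pvIdx N w
          · subst hji; rw [hsetC]; exact pvMem_set_self _ _ hjc
          · rw [hsetC, pvMem_set_ne _ _ _ hji]; exact hj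
        cover := by
          intro w' hw'
          rcases List.mem_cons.mp hw' with he | hw'
          · rw [he]
            have hm : pvMem (pvBset seen w) (pvIdx N w) = true := by
              rw [hsetS]; exact pvMem_set_self _ _ hjs
            rcases (hinv'.rel _).mp hm with he | hc
            · exact (R.inv.rel _).mpr (Or.inl he)
            · exact (R.inv.rel _).mpr (Or.inr (R.monoC _ hc))
          · exact R.cover w' hw' }

theorem passB_inv {N : Nat} {adj : List (List Int)} {s t : Nat} {m : Int}
    (hN : 0 < N) (hadj : adj.length = N)
    (seen comp : List Bool) (hinv : InvB N (NbrF adj) s t seen comp) :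
    InvB N (NbrF adj) s t (passB adj m seen comp).1 (passB adj m seen comp).2.1 ∧
      (∀ j, pvMem comp j = true → pvMem (passB adj m seen comp).2.1 j = true) := by
  have key : ∀ (vs : List Int) (st : List Bool × List Bool × Bool),
      InvB N (NbrF adj) s t st.1 st.2.1 →
      InvB N (NbrF adj) s t
          (vs.foldl (fun st v =>
            if pvBget st.2.1 v then relaxB st.1 st.2.1 st.2.2 (pvLget adj v) else st) st).1
          (vs.foldl (fun st v =>
            if pvBget st.2.1 v then relaxB st.1 st.2.1 st.2.2 (pvLget adj v) else st) st).2.1 ∧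
        (∀ j, pvMem st.2.1 j = true →
          pvMem (vs.foldl (fun st v =>
            if pvBget st.2.1 v then relaxB st.1 st.2.1 st.2.2 (pvLget adj v) else st) st).2.1 j = true) := by
    intro vs
    induction vs with
    | nil => intro st h; exact ⟨h, fun j hj => hj⟩
    | cons v rest ih =>
      rintro ⟨s1, c1, b1⟩ h
      simp only [List.foldl_cons]
      by_cases hc : pvBget c1 v = true
      · simp only [hc, if_pos]
        have hcpos : 0 < c1.length := by rw [h.lenC]; exact hN
        have hx : pvMem c1 (pvIdx N v) = true := by
          rw [pvBget_eq_pvMem c1 hcpos v, h.lenC] at hc; exact hc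
        have hre : Reach (NbrF adj) s t (pvIdx N v) := h.sound _ hx
        have hlg : pvLget adj v = adj.getD (pvIdx N v) [] := by
          unfold pvLget; rw [hadj]
        have hws : ∀ w ∈ pvLget adj v, pvIdx N w ≠ t →
            Reach (NbrF adj) s t (pvIdx N w) := by
          intro w hw hwt
          refine Reach.step hre (Reach_perm hre) (Or.inr hwt) ?_
          unfold NbrF
          rw [hadj]
          exact List.mem_map_of_mem (by rw [← hlg]; exact hw)
        have R := relaxB_spec hN (pvLget adj v) s1 c1 b1 h hws
        obtain ⟨L1, L2⟩ := ih (relaxB s1 c1 b1 (pvLget adj v)) R.inv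
        exact ⟨L1, fun j hj => L2 j (R.monoC j hj)⟩
      · simp only [hc, Bool.false_eq_true, if_false]
        exact ih (s1, c1, b1) h
  exact key _ _ hinv

theorem relaxB_ch_true (ws : List Int) (seen comp : List Bool) :
    (relaxB seen comp true ws).2.2 = true := by
  induction ws generalizing seen comp with
  | nil => rfl
  | cons w rest ih =>
    rw [relaxB]
    by_cases h : pvBget seen w = true
    · rw [if_pos h]; exact ih seen comp
    · rw [if_neg (by simp [Bool.not_eq_true] at h ⊢; exact h)]; exact ih _ _

theorem relaxB_fix (ws : List Int) (seen comp : List Bool)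
    (h : (relaxB seen comp false ws).2.2 = false) :
    relaxB seen comp false ws = (seen, comp, false) ∧ ∀ w ∈ ws, pvBget seen w = true := by
  induction ws with
  | nil => exact ⟨rfl, by intro w hw; cases hw⟩
  | cons w rest ih =>
    by_cases hw : pvBget seen w = true
    · rw [relaxB, if_pos hw] at h ⊢
      obtain ⟨h1, h2⟩ := ih h
      refine ⟨h1, ?_⟩
      intro w' hw'
      rcases List.mem_cons.mp hw' with he | hw'
      · rw [he]; exact hw
      · exact h2 w' hw'
    · exfalso
      rw [relaxB, if_neg hw, relaxB_ch_true] at h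
      cases h

theorem foldB_ch_true (adj : List (List Int)) (vs : List Int)
    (st : List Bool × List Bool × Bool) (h : st.2.2 = true) :
    (vs.foldl (fun st v =>
      if pvBget st.2.1 v then relaxB st.1 st.2.1 st.2.2 (pvLget adj v) else st) st).2.2 = true := by
  induction vs generalizing st with
  | nil => exact h
  | cons v rest ih =>
    simp only [List.foldl_cons]
    by_cases hc : pvBget st.2.1 v = true
    · rw [if_pos hc]
      refine ih _ ?_
      rw [h, relaxB_ch_true]
    · rw [if_neg hc]; exact ih st h

theorem passB_fix {adj : List (List Int)} {m : Int} (seen comp : List Bool)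
    (h : (passB adj m seen comp).2.2 = false) :
    (passB adj m seen comp).1 = seen ∧ (passB adj m seen comp).2.1 = comp ∧
      ∀ v ∈ PySem.List.pyRange 0 m 1, pvBget comp v = true →
        ∀ w ∈ pvLget adj v, pvBget seen w = true := by
  have key : ∀ (vs : List Int),
      (vs.foldl (fun st v =>
        if pvBget st.2.1 v then relaxB st.1 st.2.1 st.2.2 (pvLget adj v) else st)
        (seen, comp, false)).2.2 = false →
      (vs.foldl (fun st v =>
        if pvBget st.2.1 v then relaxB st.1 st.2.1 st.2.2 (pvLget adj v) else st)
        (seen, comp, false)) = (seen, comp, false) ∧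
      ∀ v ∈ vs, pvBget comp v = true → ∀ w ∈ pvLget adj v, pvBget seen w = true := by
    intro vs
    induction vs with
    | nil => intro _; exact ⟨rfl, by intro v hv; cases hv⟩
    | cons v rest ih =>
      intro hfin
      simp only [List.foldl_cons] at hfin ⊢
      by_cases hc : pvBget comp v = true
      · simp only [hc, if_pos] at hfin ⊢
        rcases hch : (relaxB seen comp false (pvLget adj v)).2.2 with _ | _
        · obtain ⟨hst, hcov⟩ := relaxB_fix (pvLget adj v) seen comp hch
          rw [hst] at hfin ⊢
          obtain ⟨h1, h2⟩ := ih hfin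
          refine ⟨h1, ?_⟩
          intro v' hv'
          rcases List.mem_cons.mp hv' with he | hv'
          · intro _; rw [he]; exact hcov
          · exact h2 v' hv'
        · exfalso
          have := foldB_ch_true adj rest _ hch
          rw [this] at hfin; cases hfin
      · simp only [hc, Bool.false_eq_true, if_false] at hfin ⊢
        obtain ⟨h1, h2⟩ := ih hfin
        refine ⟨h1, ?_⟩
        intro v' hv'
        rcases List.mem_cons.mp hv' with he | hv'
        · intro hcv; rw [he] at hcv; rw [hcv] at hc; exact absurd rfl hc
        · exact h2 v' hv'
  obtain ⟨h1, h2⟩ := key (PySem.List.pyRange 0 m 1) (by unfold passB at h; exact h)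
  unfold passB
  rw [h1]
  exact ⟨rfl, rfl, h2⟩

structure LoopBOut (N : Nat) (f : Nat → List Nat) (s t : Nat)
    (comp : List Bool) (r : List Bool × List Bool) : Prop where
  inv : InvB N f s t r.1 r.2
  monoC : ∀ j, pvMem comp j = true → pvMem r.2 j = true
  closed : ∀ x, pvMem r.2 x = true → ∀ y ∈ f x, pvMem r.1 y = true

theorem loopB_spec {N : Nat} (adj : List (List Int)) (s t : Nat) (m : Int)
    (hN : 0 < N) (hadj : adj.length = N) (hm : (N : Int) = m) :
    ∀ (seen comp : List Bool), InvB N (NbrF adj) s t seen comp →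
      LoopBOut N (NbrF adj) s t comp (loopB adj m seen comp) := by
  intro seen comp
  induction seen, comp using loopB.induct (adj := adj) (m := m) with
  | case1 seen comp rr hch ih =>
    intro hinv
    have hrr : rr = passB adj m seen comp := rfl
    rw [hrr] at hch
    obtain ⟨hinv', hmono⟩ := passB_inv hN hadj seen comp hinv
    have L := ih (by rw [hrr]; exact hinv')
    rw [hrr] at L
    rw [loopB]
    simp only [hch, if_pos]
    exact {
      inv := L.inv
      monoC := fun j hj => L.monoC j (hmono j hj)
      closed := L.closed }
  | case2 seen comp rr hch =>
    intro hinv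
    have hrr : rr = passB adj m seen comp := rfl
    rw [hrr, Bool.not_eq_true] at hch
    obtain ⟨hs, hc, hcov⟩ := passB_fix seen comp hch
    rw [loopB]
    simp only [hch, Bool.false_eq_true, if_false]
    rw [hs, hc]
    refine {
      inv := hinv
      monoC := fun j hj => hj
      closed := ?_ }
    intro x hx y hy
    have hxlt : x < N := by
      by_contra hge
      rw [pvMem_of_ge comp x (by rw [hinv.lenC]; omega)] at hx
      cases hx
    have hxv : ((x : Int)) ∈ PySem.List.pyRange 0 m 1 := by
      rw [PySem.List.mem_pyRange_one]
      constructor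
      · exact Int.natCast_nonneg x
      · rw [← hm]; exact_mod_cast hxlt
    have hcx : pvBget comp (x : Int) = true := by
      rw [pvBget_eq_pvMem comp (by rw [hinv.lenC]; exact hN) (x : Int), hinv.lenC,
        pvIdx_coe x hxlt]
      exact hx
    have hcov' := hcov (x : Int) hxv hcx
    -- translate y ∈ NbrF adj x into membership of the raw neighbour list
    unfold NbrF at hy
    rcases List.mem_map.mp hy with ⟨w, hw, rfl⟩
    have hlg : pvLget adj (x : Int) = adj.getD x [] := by
      unfold pvLget; rw [hadj, pvIdx_coe x hxlt]
    have := hcov' w (by rw [hlg]; exact hw)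
    rw [pvBget_eq_pvMem seen (by rw [hinv.lenS]; exact hN) w, hinv.lenS] at this
    rw [hadj]
    exact this

theorem pvMem_replicate (N j : Nat) : pvMem (List.replicate N false) j = false := by
  unfold pvMem
  rw [List.getD_eq_getElem?_getD, List.getElem?_replicate]
  by_cases h : j < N <;> simp [h]

theorem pvMem_eq_getElem (l : List Bool) (k : Nat) (hk : k < l.length) : pvMem l k = l[k] := by
  unfold pvMem; rw [List.getD_eq_getElem _ _ hk]

theorem length_pvLapp (l : List (List Int)) (i x : Int) :
    (pvLapp l i x).length = l.length := by
  unfold pvLapp; simp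

-- ===== the per-edge counts agree =====

theorem edge_eq (n : Int) (hn : 0 ≤ n) (tree : List (List Int))
    (htree : tree.length = (n + 1).toNat)
    (start split : Int) :
    bfsA start (pvBset (List.replicate (n + 1).toNat false) split) tree =
      ((loopB tree (n + 1)
          (pvBset (pvBset (List.replicate (n + 1).toNat false) split) start)
          (pvBset (List.replicate (n + 1).toNat false) start)).2.count true : Int) := by
  set N := (n + 1).toNat with hNdef
  have hN : 0 < N := by omega
  have hmN : ((N : Nat) : Int) = n + 1 := by omega
  set s := pvIdx N start with hsdef
  set t := pvIdx N split with htdef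
  have hsN : s < N := pvIdx_lt hN start
  have htN : t < N := pvIdx_lt hN split
  set L0 := (List.replicate N false).set t true with hL0
  set L1 := L0.set s true with hL1
  set C0 := (List.replicate N false).set s true with hC0
  have hlen0 : L0.length = N := by rw [hL0]; simp
  have hlen1 : L1.length = N := by rw [hL1]; simp [hlen0]
  have hlenC : C0.length = N := by rw [hC0]; simp
  have e1 : pvBset (List.replicate N false) split = L0 := by
    unfold pvBset; rw [List.length_replicate]
  have e2 : pvBset L0 start = L1 := by
    unfold pvBset; rw [hlen0]
  have ec : pvBset (List.replicate N false) start = C0 := by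
    unfold pvBset; rw [List.length_replicate]
  rw [e1, e2, ec]
  show (loopA tree (pvBset L0 start) [start] 1).1 = _
  rw [e2]
  -- membership of the two initial lists
  have hm1 : ∀ j, pvMem L1 j = true ↔ (j = s ∨ j = t) := by
    intro j
    by_cases hjs : j = s
    · subst hjs
      rw [hL1, pvMem_set_self _ _ (by rw [hlen0]; exact hsN)]
      simp
    · rw [hL1, pvMem_set_ne _ _ _ hjs]
      by_cases hjt : j = t
      · subst hjt
        rw [hL0, pvMem_set_self _ _ (by simp; exact htN)]
        simp
      · rw [hL0, pvMem_set_ne _ _ _ hjt, pvMem_replicate]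
        simp [hjs, hjt]
  have hmC : ∀ j, pvMem C0 j = true ↔ j = s := by
    intro j
    by_cases hjs : j = s
    · subst hjs
      rw [hC0, pvMem_set_self _ _ (by simp; exact hsN)]
      simp
    · rw [hC0, pvMem_set_ne _ _ _ hjs, pvMem_replicate]
      simp [hjs]
  -- run A's loop
  have hTL : tree.length = N := htree
  have LA := loopA_spec tree s t (by rw [hTL]; exact hN) L1 [start] 1
    (by rw [hlen1, hTL])
    ((hm1 t).mpr (Or.inr rfl))
    (by
      intro v hv
      rcases List.mem_singleton.mp hv with rfl
      constructor
      · rw [hTL]; exact Or.inl rfl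
      · rw [hTL]; exact Reach.base)
    (by
      intro j hj
      rcases (hm1 j).mp hj with rfl | rfl
      · exact Or.inr Reach.base
      · exact Or.inl rfl)
    (by
      intro x hx hpx
      left
      rcases (hm1 x).mp hx with rfl | rfl
      · exact ⟨start, List.mem_singleton_self start, by rw [hTL]⟩
      · rcases hpx with he | hne
        · exact ⟨start, List.mem_singleton_self start, by rw [hTL, he]⟩
        · exact absurd rfl hne)
  rw [hTL] at LA
  set rA := loopA tree L1 [start] 1 with hrA
  have hAmem : ∀ j, pvMem rA.2 j = true ↔ (j = t ∨ Reach (NbrF tree) s t j) := by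
    intro j
    constructor
    · exact LA.sound j
    · intro h
      rcases h with he | hr
      · rw [he]; exact LA.mono t ((hm1 t).mpr (Or.inr rfl))
      · exact Reach_mem_of_closed rA.2 (LA.mono s ((hm1 s).mpr (Or.inl rfl))) LA.closed j hr
  -- run B's loop
  have hinvB : InvB N (NbrF tree) s t L1 C0 := {
    lenS := hlen1
    lenC := hlenC
    rel := by
      intro j
      rw [hm1 j]
      constructor
      · intro h
        rcases h with he | he
        · exact Or.inr ((hmC j).mpr he)
        · exact Or.inl he
      · intro h
        rcases h with he | hc
        · exact Or.inr he
        · exact Or.inl ((hmC j).mp hc)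
    sound := by
      intro j hj
      rw [(hmC j).mp hj]
      exact Reach.base }
  have LB := loopB_spec (N := N) tree s t (n + 1) hN hTL hmN L1 C0 hinvB
  set rB := loopB tree (n + 1) L1 C0 with hrB
  have hBc : ∀ j, Reach (NbrF tree) s t j → pvMem rB.2 j = true := by
    intro j h
    induction h with
    | base => exact LB.monoC s ((hmC s).mpr rfl)
    | @step x y hx hpx hpy hyf ih =>
      have hy1 : pvMem rB.1 y = true := LB.closed x ih y hyf
      rcases (LB.inv.rel y).mp hy1 with he | hc
      · rcases hpy with hys | hyt
        · rw [hys]; exact LB.monoC s ((hmC s).mpr rfl)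
        · exact absurd he hyt
      · exact hc
  have hBmem : ∀ j, pvMem rB.2 j = true ↔ Reach (NbrF tree) s t j :=
    fun j => ⟨LB.inv.sound j, hBc j⟩
  -- the two final lists agree up to the forced t-cell
  have hlist : rA.2 = rB.2.set t true := by
    refine List.ext_getElem ?_ ?_
    · rw [LA.len, hlen1, List.length_set, LB.inv.lenC]
    · intro k h1 h2
      have hkB : k < rB.2.length := by simpa using h2
      rw [← pvMem_eq_getElem _ _ h1, ← pvMem_eq_getElem _ _ h2]
      by_cases hkt : k = t
      · rw [hkt, pvMem_set_self rB.2 t (hkt ▸ hkB), (hAmem t).mpr (Or.inl rfl)]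
      · rw [pvMem_set_ne _ _ _ hkt]
        cases hb : pvMem rB.2 k
        · cases ha : pvMem rA.2 k
          · rfl
          · exfalso
            rcases (hAmem k).mp ha with rfl | hr
            · exact hkt rfl
            · rw [(hBmem k).mpr hr] at hb; cases hb
        · exact (hAmem k).mpr (Or.inr ((hBmem k).mp hb))
  -- counting
  have hmt : pvMem rB.2 t = true ↔ s = t := by
    rw [hBmem t, Reach_t_iff, eq_comm]
  have hsetcnt : (rB.2.set t true).count true =
      rB.2.count true + (if pvMem rB.2 t = true then 0 else 1) :=
    count_true_set _ t (by rw [LB.inv.lenC]; exact htN)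
  have hcnt0 : L0.count true = 1 := by
    rw [hL0, count_true_set _ t (by simp; exact htN), pvMem_replicate]
    simp [List.count_replicate]
  have hmem0s : pvMem L0 s = true ↔ s = t := by
    by_cases hst : s = t
    · rw [hst, hL0, pvMem_set_self _ _ (by simp; exact htN)]; simp
    · rw [hL0, pvMem_set_ne _ _ _ hst, pvMem_replicate]; simp [hst]
  have hcnt1 : L1.count true = 1 + (if s = t then 0 else 1) := by
    rw [hL1, count_true_set _ s (by rw [hlen0]; exact hsN), hcnt0]
    by_cases hst : s = t
    · rw [if_pos (hmem0s.mpr hst), if_pos hst]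
    · rw [if_neg (fun h => hst (hmem0s.mp h)), if_neg hst]
  have hAcnt := LA.cnt
  rw [hlist] at hAcnt
  rw [hsetcnt, hcnt1] at hAcnt
  by_cases hst : s = t
  · rw [if_pos (hmt.mpr hst), if_pos hst] at hAcnt
    omega
  · rw [if_neg (fun h => hst (hmt.mp h)), if_neg hst] at hAcnt
    omega

-- the adjacency fold preserves the list length
theorem build_len (n : Int) (wires : List (Int × Int)) :
    (wires.foldl (fun t p => pvLapp (pvLapp t p.1 p.2) p.2 p.1)
        (List.replicate (n + 1).toNat [])).length = (n + 1).toNat := by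
  have key : ∀ (ws : List (Int × Int)) (ta : List (List Int)),
      (ws.foldl (fun t p => pvLapp (pvLapp t p.1 p.2) p.2 p.1) ta).length = ta.length := by
    intro ws
    induction ws with
    | nil => intro ta; rfl
    | cons p ps ih =>
      intro ta
      simp only [List.foldl_cons]
      rw [ih, length_pvLapp, length_pvLapp]
  rw [key]; simp

theorem foldl_ext' {α β : Type} (f g : α → β → α) (l : List β)
    (h : ∀ a b, b ∈ l → f a b = g a b) : ∀ a, l.foldl f a = l.foldl g a := by
  induction l with
  | nil => intro a; rfl
  | cons b bs ih =>
    intro a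
    simp only [List.foldl_cons]
    rw [h a b (List.mem_cons_self)]
    exact ih (fun a' b' hb' => h a' b' (List.mem_cons_of_mem _ hb')) _

-- ===== VERDICT (by name: the statement is the Claim_ definition above) =====
theorem solution_spec : Claim_equal_solution := by
  intro n wires hdom hpre
  unfold Spec_solution
  cases wires with
  | nil => rfl
  | cons hd tl =>
    have hn : 0 ≤ n := by
      have := hpre hd (List.mem_cons_self)
      omega
    have htree := build_len n (hd :: tl)
    simp only [solution, solution_alt]
    refine foldl_ext' _ _ _ ?_ n
    intro answer p hp
    have hce := edge_eq n hn _ htree p.1 p.2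
    rw [hce]
    have habs : ∀ c : Int, |c - (n - c)| = |2 * c - n| := fun c => by ring_nf
    rw [habs]
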